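-- pv_equiv track=rewrite | github.com/evajs/pyLadies | 09/ai_eva_blazkova.py | nejdelsi_volny_prostor
-- ===== SOURCE A (Python) =====
-- def nejdelsi_volny_prostor(pole):
--     "Vrací pozici začátku a délku nejdelšího úseku -"
--
--     nejdelsi_zacina = 0
--     nejdelsi_delka = 0
--     aktualni_zacina = 0
--     aktualni_delka = 0
--     for i in range(len(pole)):
--         if pole[i] == '-':
--             if i - aktualni_delka != aktualni_zacina:
--                 aktualni_zacina = i
--             aktualni_delka += 1
--         else:
--             if aktualni_delka > nejdelsi_delka:
--                 nejdelsi_delka = aktualni_delka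
--                 nejdelsi_zacina = aktualni_zacina
--                 aktualni_delka = 0
--             else:
--                 aktualni_delka = 0
--     if aktualni_delka > nejdelsi_delka:
--         nejdelsi_delka = aktualni_delka
--         nejdelsi_zacina = aktualni_zacina
--     return (nejdelsi_zacina, nejdelsi_delka)
-- ===== SOURCE B (Python) =====
-- def nejdelsi_volny_prostor(pole):
--     "Vrací pozici začátku a délku nejdelšího úseku -"
--     best_start = 0
--     best_len = 0
--     i = 0
--     n = len(pole)
--     while i < n:
--         j = i + 1
--         while j < n and pole[j] == pole[i]:
--             j += 1
--         if pole[i] == '-' and j - i > best_len: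
--             best_start = i
--             best_len = j - i
--         i = j
--     return (best_start, best_len)
-- ===== Notes on version B (the rewrite author's own statement) =====
-- stated objective: simpler
-- what changed: A sweeps indices maintaining four state variables with a stale-start correction and a post-loop fixup; B decomposes the list into maximal runs of equal elements (two-index run scan) and records a dash run only when it beats the best, needing just two state variables and no fixup.
import Mathlib
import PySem

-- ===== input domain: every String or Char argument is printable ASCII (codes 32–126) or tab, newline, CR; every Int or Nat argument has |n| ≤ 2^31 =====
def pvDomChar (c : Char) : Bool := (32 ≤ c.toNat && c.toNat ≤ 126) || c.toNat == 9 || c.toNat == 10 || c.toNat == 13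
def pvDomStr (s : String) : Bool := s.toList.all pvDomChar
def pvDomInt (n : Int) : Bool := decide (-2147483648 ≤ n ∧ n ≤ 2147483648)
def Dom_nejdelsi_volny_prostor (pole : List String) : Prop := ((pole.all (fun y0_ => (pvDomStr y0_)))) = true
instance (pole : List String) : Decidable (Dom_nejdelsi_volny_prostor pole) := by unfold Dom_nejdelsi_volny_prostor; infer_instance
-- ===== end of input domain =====

-- B replaces A's index sweep with a run-decomposition (find each maximal run of equal
-- elements at once, record dash runs that beat the best): simpler, same O(n) cost.


-- ===== PORT A =====
-- loop body of A: state (nejdelsi_zacina, nejdelsi_delka, aktualni_zacina, aktualni_delka)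
def stepA (st : Int × Int × Int × Int) (p : Int × String) : Int × Int × Int × Int :=
  match st, p with
  | (nz, nd, az, ad), (i, x) =>
    if x = "-" then
      (nz, nd, (if i - ad ≠ az then i else az), ad + 1)
    else
      if ad > nd then (az, ad, az, 0) else (nz, nd, az, 0)

-- the trailing 'if aktualni_delka > nejdelsi_delka' after the loop
def finishA : Int × Int × Int × Int → Int × Int
  | (nz, nd, az, ad) => if ad > nd then (az, ad) else (nz, nd)

def nejdelsi_volny_prostor (pole : List String) : Int × Int :=
  finishA ((PySem.List.enumerate pole 0).foldl stepA (0, 0, 0, 0))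

-- ===== PORT B =====
-- inner while of B: length of the maximal prefix of ys equal to x
def runLen (x : String) : List String → Nat
  | [] => 0
  | y :: ys => if y = x then runLen x ys + 1 else 0

-- outer while of B: consume one maximal run per step
def goB : List String → Int → Int × Int → Int × Int
  | [], _, best => best
  | x :: xs, i, best =>
    let r := runLen x xs
    let best' := if x = "-" ∧ (r : Int) + 1 > best.2 then (i, (r : Int) + 1) else best
    goB (xs.drop r) (i + (r : Int) + 1) best'
termination_by xs => xs.length
decreasing_by simp

def nejdelsi_volny_prostor_alt (pole : List String) : Int × Int :=
  goB pole 0 (0, 0)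

-- ===== PRECONDITION & SPEC =====
def Spec_nejdelsi_volny_prostor (pole : List String) (out : Int × Int) : Prop := out = nejdelsi_volny_prostor_alt pole
instance (pole : List String) (out : Int × Int) : Decidable (Spec_nejdelsi_volny_prostor pole out) := by unfold Spec_nejdelsi_volny_prostor; infer_instance

-- ===== CLAIM (what is proved, stated in full; the proofs are below) =====
def Claim_equal_nejdelsi_volny_prostor : Prop := ∀ (pole : List String), Dom_nejdelsi_volny_prostor pole → Spec_nejdelsi_volny_prostor pole (nejdelsi_volny_prostor pole)

-- ===== LEMMAS AND PROOFS =====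

-- goB's one-step unfolding with the lets resolved (rw-friendly)
theorem goB_cons (x : String) (xs : List String) (i : Int) (best : Int × Int) :
    goB (x :: xs) i best
      = goB (xs.drop (runLen x xs)) (i + (runLen x xs : Int) + 1)
          (if x = "-" ∧ (runLen x xs : Int) + 1 > best.2 then (i, (runLen x xs : Int) + 1) else best) := by
  rw [goB]

-- skipping a non-dash head element only advances B's offset
theorem goB_skip (x : String) (xs : List String) (i : Int) (best : Int × Int)
    (hx : x ≠ "-") : goB (x :: xs) i best = goB xs (i + 1) best := by
  cases xs with
  | nil => rw [goB_cons]; simp [runLen, hx]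
  | cons y ys =>
    by_cases hyx : y = x
    · subst hyx
      rw [goB_cons, goB_cons]
      simp only [runLen, if_pos rfl, hx, false_and, if_false]
      congr 1
      push_cast
      ring
    · rw [goB_cons]
      simp [runLen, hyx, hx]

-- A's loop over a maximal dash run just grows aktualni_delka, keeping az = i - ad
theorem foldl_dash_run (xs : List String) (i d nz nd : Int) :
    (PySem.List.enumerate xs i).foldl stepA (nz, nd, i - d, d)
      = (PySem.List.enumerate (xs.drop (runLen "-" xs)) (i + (runLen "-" xs : Int))).foldl
          stepA (nz, nd, i - d, d + (runLen "-" xs : Int)) := by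
  induction xs generalizing i d with
  | nil => simp [runLen]
  | cons h t ih =>
    by_cases hh : h = "-"
    · subst hh
      rw [PySem.List.enumerate_cons, List.foldl_cons]
      have hstep : stepA (nz, nd, i - d, d) (i, "-") = (nz, nd, i - d, d + 1) := by
        simp [stepA]
      rw [hstep]
      have h1 : i - d = (i + 1) - (d + 1) := by ring
      rw [h1, ih (i + 1) (d + 1), ← h1]
      have hrl : runLen "-" ("-" :: t) = runLen "-" t + 1 := by simp [runLen]
      rw [hrl, List.drop_succ_cons]
      push_cast
      ring_nf
    · simp [runLen, hh]

-- the element right after a maximal run differs from the run's value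
theorem runLen_drop_head (x : String) (xs : List String) (y : String) (ys : List String)
    (h : xs.drop (runLen x xs) = y :: ys) : y ≠ x := by
  induction xs generalizing y ys with
  | nil => simp [runLen] at h
  | cons h0 t ih =>
    by_cases h0x : h0 = x
    · subst h0x
      rw [runLen, if_pos rfl, List.drop_succ_cons] at h
      exact ih y ys h
    · rw [runLen, if_neg h0x, List.drop_zero] at h
      obtain ⟨rfl, -⟩ := List.cons.injEq .. ▸ h
      exact h0x

-- main invariant: at a run boundary (aktualni_delka = 0) A's remaining sweep computes B's scan
theorem mainA (n : Nat) : ∀ (xs : List String), xs.length ≤ n →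
    ∀ (i nz nd az : Int), 0 ≤ nd →
    finishA ((PySem.List.enumerate xs i).foldl stepA (nz, nd, az, 0)) = goB xs i (nz, nd) := by
  induction n with
  | zero =>
    intro xs hlen i nz nd az hnd
    obtain rfl : xs = [] := List.eq_nil_of_length_eq_zero (Nat.le_zero.mp hlen)
    simp [PySem.List.enumerate_nil, finishA, goB, not_lt.mpr hnd]
  | succ n ih =>
    intro xs hlen i nz nd az hnd
    cases xs with
    | nil => simp [PySem.List.enumerate_nil, finishA, goB, not_lt.mpr hnd]
    | cons x xs' =>
      have hlen' : xs'.length ≤ n := by simpa using hlen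
      by_cases hx : x = "-"
      · subst hx
        rw [PySem.List.enumerate_cons, List.foldl_cons]
        have hstep : stepA (nz, nd, az, 0) (i, "-") = (nz, nd, i, 1) := by
          by_cases haz : az = i <;> simp [stepA, haz, sub_zero] <;> try omega
        rw [hstep]
        have h1 : ((nz, nd, i, (1:Int)) : Int × Int × Int × Int)
            = (nz, nd, (i+1) - 1, (1:Int)) := by norm_num
        rw [h1, foldl_dash_run xs' (i+1) 1 nz nd]
        have hsub : (i + 1) - 1 = i := by ring
        rw [hsub]
        cases hrest : xs'.drop (runLen "-" xs') with
        | nil =>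
          rw [PySem.List.enumerate_nil, List.foldl_nil, goB_cons, hrest, goB]
          have e : (1:Int) + (runLen "-" xs' : Int) = (runLen "-" xs' : Int) + 1 := by ring
          rw [finishA, e]
          by_cases hc : (runLen "-" xs' : Int) + 1 > nd
          · rw [if_pos hc, if_pos ⟨rfl, hc⟩]
          · rw [if_neg hc, if_neg (by rintro ⟨-, h⟩; exact hc h)]
        | cons y ys =>
          have hy : y ≠ "-" := runLen_drop_head "-" xs' y ys hrest
          have hys : ys.length ≤ n := by
            have := congrArg List.length hrest
            simp [List.length_drop] at this
            omega
          rw [PySem.List.enumerate_cons, List.foldl_cons]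
          by_cases hc : (runLen "-" xs' : Int) + 1 > nd
          · have hstep2 : stepA (nz, nd, i, 1 + (runLen "-" xs' : Int)) (i + 1 + (runLen "-" xs' : Int), y)
                = (i, 1 + (runLen "-" xs' : Int), i, 0) := by
              simp [stepA, hy]
              omega
            rw [hstep2, ih ys hys _ _ _ _ (by omega)]
            rw [goB_cons, hrest, if_pos ⟨rfl, hc⟩, goB_skip y ys _ _ hy]
            congr 1
            · ring
            · rw [Prod.mk.injEq]; exact ⟨rfl, by ring⟩
          · have hstep2 : stepA (nz, nd, i, 1 + (runLen "-" xs' : Int)) (i + 1 + (runLen "-" xs' : Int), y)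
                = (nz, nd, i, 0) := by
              simp [stepA, hy]
              omega
            rw [hstep2, ih ys hys _ _ _ _ hnd]
            rw [goB_cons, hrest, if_neg (by rintro ⟨-, h⟩; exact hc h), goB_skip y ys _ _ hy]
            congr 1
            ring
      · rw [PySem.List.enumerate_cons, List.foldl_cons]
        have hstep : stepA (nz, nd, az, 0) (i, x) = (nz, nd, az, 0) := by
          simp [stepA, hx, not_lt.mpr hnd]
        rw [hstep, ih xs' hlen' _ _ _ _ hnd, goB_skip x xs' i _ hx]

-- ===== VERDICT (by name: the statement is the Claim_ definition above) =====
theorem nejdelsi_volny_prostor_spec : Claim_equal_nejdelsi_volny_prostor := by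
  intro pole _
  unfold Spec_nejdelsi_volny_prostor nejdelsi_volny_prostor nejdelsi_volny_prostor_alt
  exact mainA pole.length pole le_rfl 0 0 0 0 le_rfl
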